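-- pv_equiv track=rewrite | github.com/mugglim/kakao-coding-test | 2020-kakao-intership/Q5.동굴-탐험.py | solution
-- ===== SOURCE A (Python) =====
-- from collections import deque
--
-- def has_cycle(graph):
--     n = len(graph)
--     indegree_list = [0] * n
--     for adj_node_list in graph:
--         for adj_node in adj_node_list:
--             indegree_list[adj_node] += 1
--
--     queue = deque([node for node in range(n) if indegree_list[node] == 0])
--
--     while queue:
--         node = queue.popleft()
--         for adj_node in graph[node]:
--             indegree_list[adj_node] -= 1
--             if indegree_list[adj_node] == 0:
--                 queue.append(adj_node)
--
--     return not sum(indegree_list) == 0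
--
-- def solution(n, path, order):
--     ud_graph = [[] for _ in range(n)]
--     d_graph = [[] for _ in range(n)]
--     visited_set = set()
--
--     for [a, b] in path:
--         ud_graph[a].append(b)
--         ud_graph[b].append(a)
--
--     queue = deque([0])
--     visited_set.add(0)
--
--     while queue:
--         node = queue.popleft()
--         for child_node in ud_graph[node]:
--             if child_node not in visited_set:
--                 visited_set.add(child_node)
--                 queue.append(child_node)
--                 d_graph[child_node].append(node)
--
--     for [a, b] in order:
--         d_graph[b].append(a)
--
--     return not has_cycle(d_graph)
-- ===== SOURCE B (Python) =====
-- from collections import deque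
--
-- def solution(n, path, order):
--     ud_graph = [[] for _ in range(n)]
--     for a, b in path:
--         ud_graph[a].append(b)
--         ud_graph[b].append(a)
--
--     # in-edge lists: pred[v] holds the tails u of the directed edges u -> v
--     pred = [[] for _ in range(n)]
--     visited_set = {0}
--     queue = deque([0])
--     while queue:
--         node = queue.popleft()
--         for child in ud_graph[node]:
--             if child not in visited_set:
--                 visited_set.add(child)
--                 queue.append(child)
--                 pred[node].append(child)  # tree edge child -> parent
--
--     for a, b in order:
--         pred[a].append(b)  # order edge b -> a
--
--     # dataflow fixpoint instead of Kahn's peel: a node becomes safe once all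
--     # of its predecessors are safe; the graph is acyclic iff after n
--     # synchronous rounds every node is safe
--     safe = [False] * n
--     for _ in range(n):
--         safe = [all(safe[u] for u in pred[v]) for v in range(n)]
--     return all(safe)
-- ===== Notes on version B (the rewrite author's own statement) =====
-- stated objective: alternative
-- what changed: B builds the reversed (predecessor) adjacency directly during the BFS rooting instead of an out-adjacency graph, and decides acyclicity by iterating a synchronous 'all predecessors safe' fixpoint n rounds instead of Kahn's indegree-counting queue peel.
import Mathlib
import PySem

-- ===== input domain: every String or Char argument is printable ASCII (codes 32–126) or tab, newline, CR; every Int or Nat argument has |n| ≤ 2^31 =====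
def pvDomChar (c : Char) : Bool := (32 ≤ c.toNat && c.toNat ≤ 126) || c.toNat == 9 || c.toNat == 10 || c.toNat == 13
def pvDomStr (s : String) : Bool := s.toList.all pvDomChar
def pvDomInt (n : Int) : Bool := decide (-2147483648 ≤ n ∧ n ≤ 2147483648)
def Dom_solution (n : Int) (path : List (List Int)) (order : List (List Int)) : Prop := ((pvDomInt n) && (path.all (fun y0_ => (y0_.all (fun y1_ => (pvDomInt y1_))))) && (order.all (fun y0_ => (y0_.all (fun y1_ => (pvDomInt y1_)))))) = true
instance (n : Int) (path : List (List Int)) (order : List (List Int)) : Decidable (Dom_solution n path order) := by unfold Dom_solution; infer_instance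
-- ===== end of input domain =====

-- B replaces Kahn's indegree/queue topological peel by a synchronous "safe node" fixpoint over
-- predecessor lists that are built directly (no out-adjacency graph, no indegree counting);
-- objective: alternative (structurally different, not faster).

-- ===== PORT A =====
-- shared primitive of both Pythons: g[i].append(x) on a list of lists (exact Python index semantics for in-range i, incl. negative)
def pvAppendAt (g : List (List Int)) (i : Int) (x : Int) : List (List Int) :=
  PySem.List.pySetD g i (PySem.List.pyGetD g i [] ++ [x])

-- both Pythons: 'for a, b in path: ud_graph[a].append(b); ud_graph[b].append(a)'
-- (a list that is not a pair raises ValueError in Python — outside Pre_, the junk branch is unreachable there)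
def pvAddPathEdges (g : List (List Int)) (p : List Int) : List (List Int) :=
  match p with
  | [a, b] => pvAppendAt (pvAppendAt g a b) b a
  | _ => g

-- A's BFS rooting loop; fuel bounds the number of dequeues (each dequeue follows an enqueue, and
-- enqueues after the initial one add a fresh member of some adjacency list to visited_set)
def bfsA (ud : List (List Int)) : Nat → List Int → PySem.Set Int → List (List Int) → List (List Int)
  | 0, _, _, d => d
  | fuel+1, queue, vis, d =>
    match queue with
    | [] => d
    | node :: rest =>
      let s := (PySem.List.pyGetD ud node []).foldl
        (fun (s : List Int × PySem.Set Int × List (List Int)) child =>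
          if s.2.1.contains child then s
          else (s.1 ++ [child], PySem.Set.add s.2.1 child, pvAppendAt s.2.2 child node))
        (rest, vis, d)
      bfsA ud fuel s.1 s.2.1 s.2.2

-- the 'while queue' loop of has_cycle; fuel n+1 suffices: each node enters the queue at most once
def kahnA (graph : List (List Int)) : Nat → List Int → List Int → List Int
  | 0, _, ind => ind
  | fuel+1, queue, ind =>
    match queue with
    | [] => ind
    | node :: rest =>
      let s := (PySem.List.pyGetD graph node []).foldl
        (fun (s : List Int × List Int) adj =>
          let ind' := PySem.List.pySetD s.1 adj (PySem.List.pyGetD s.1 adj 0 - 1)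
          if PySem.List.pyGetD ind' adj 0 == 0 then (ind', s.2 ++ [adj]) else (ind', s.2))
        (ind, rest)
      kahnA graph fuel s.2 s.1

def hasCycleA (graph : List (List Int)) : Bool :=
  let nn := graph.length
  let ind := graph.foldl
    (fun ind adj => adj.foldl (fun ind v => PySem.List.pySetD ind v (PySem.List.pyGetD ind v 0 + 1)) ind)
    (List.replicate nn (0:Int))
  let q0 := (PySem.List.pyRange 0 (nn:Int) 1).filter (fun v => PySem.List.pyGetD ind v 0 == 0)
  let indF := kahnA graph (nn + 1) q0 ind
  !(indF.sum == 0)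

def solution (n : Int) (path : List (List Int)) (order : List (List Int)) : Bool :=
  let ud := path.foldl pvAddPathEdges ((PySem.List.pyRange 0 n 1).map (fun _ => ([] : List Int)))
  let d0 := (PySem.List.pyRange 0 n 1).map (fun _ => ([] : List Int))
  let fuel := ud.foldl (fun acc l => acc + l.length) 0 + 1
  let d1 := bfsA ud fuel [0] (PySem.Set.ofList [0]) d0
  let d2 := order.foldl (fun g p => match p with | [a, b] => pvAppendAt g b a | _ => g) d1
  !(hasCycleA d2)

-- ===== PORT B =====
-- B's BFS: same traversal, but it records the reversed (predecessor) edge pred[node].append(child)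
def bfsB (ud : List (List Int)) : Nat → List Int → PySem.Set Int → List (List Int) → List (List Int)
  | 0, _, _, pred => pred
  | fuel+1, queue, vis, pred =>
    match queue with
    | [] => pred
    | node :: rest =>
      let s := (PySem.List.pyGetD ud node []).foldl
        (fun (s : List Int × PySem.Set Int × List (List Int)) child =>
          if s.2.1.contains child then s
          else (s.1 ++ [child], PySem.Set.add s.2.1 child, pvAppendAt s.2.2 node child))
        (rest, vis, pred)
      bfsB ud fuel s.1 s.2.1 s.2.2

def solution_alt (n : Int) (path : List (List Int)) (order : List (List Int)) : Bool :=
  let ud := path.foldl pvAddPathEdges ((PySem.List.pyRange 0 n 1).map (fun _ => ([] : List Int)))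
  let pred0 := (PySem.List.pyRange 0 n 1).map (fun _ => ([] : List Int))
  let fuel := ud.foldl (fun acc l => acc + l.length) 0 + 1
  let pred1 := bfsB ud fuel [0] (PySem.Set.ofList [0]) pred0
  let pred := order.foldl (fun g p => match p with | [a, b] => pvAppendAt g a b | _ => g) pred1
  let safeF := (PySem.List.pyRange 0 n 1).foldl
    (fun safe _ => (PySem.List.pyRange 0 n 1).map
      (fun v => (PySem.List.pyGetD pred v []).all (fun u => PySem.List.pyGetD safe u false)))
    ((PySem.List.pyRange 0 n 1).map (fun _ => false))
  safeF.all (fun b => b)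

-- ===== PRECONDITION & SPEC =====
-- Pre_ is exactly the set of inputs on which Python A returns normally: n ≥ 1 (else ud_graph[0] is an
-- IndexError), every element of path and order a two-element list (else ValueError on unpacking) whose
-- entries are valid Python indices into a length-n list, i.e. in [-n, n) (else IndexError).
def Pre_solution (n : Int) (path : List (List Int)) (order : List (List Int)) : Prop :=
  1 ≤ n ∧
  (∀ p ∈ path, p.length = 2 ∧ ∀ x ∈ p, -n ≤ x ∧ x < n) ∧
  (∀ p ∈ order, p.length = 2 ∧ ∀ x ∈ p, -n ≤ x ∧ x < n)
instance (n : Int) (path : List (List Int)) (order : List (List Int)) : Decidable (Pre_solution n path order) := by unfold Pre_solution; infer_instance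

def pvWitness_solution : Int × List (List Int) × List (List Int) := (3, [[0, 1], [1, 2]], [[2, 1]])

def Spec_solution (n : Int) (path : List (List Int)) (order : List (List Int)) (out : Bool) : Prop := out = solution_alt n path order
instance (n : Int) (path : List (List Int)) (order : List (List Int)) (out : Bool) : Decidable (Spec_solution n path order out) := by unfold Spec_solution; infer_instance

-- ===== CLAIM (what is proved, stated in full; the proofs are below) =====
def Claim_equal_solution : Prop := ∀ (n : Int) (path : List (List Int)) (order : List (List Int)), Dom_solution n path order → Pre_solution n path order → Spec_solution n path order (solution n path order)

-- ===== LEMMAS AND PROOFS =====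

-- canonical (wrapped) index of an in-range Python index into a length-nn list
def canonI (nn : Nat) (i : Int) : Nat := (if i < 0 then i + nn else i).toNat
def InR (nn : Nat) (i : Int) : Prop := -(nn:Int) ≤ i ∧ i < nn
-- number of raw entries of lst denoting canonical node w
def cntc (nn : Nat) (w : Nat) (lst : List Int) : Nat := (lst.map (canonI nn)).count w

def GoodG (nn : Nat) (g : List (List Int)) : Prop :=
  g.length = nn ∧ ∀ l ∈ g, ∀ x ∈ l, InR nn x
-- d (out-adjacency, A) and p (in-adjacency, B) describe the same edge multiset
def RelG (nn : Nat) (d p : List (List Int)) : Prop :=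
  ∀ u v, u < nn → v < nn → cntc nn v (d.getD u []) = cntc nn u (p.getD v [])
def RelFull (nn : Nat) (d p : List (List Int)) : Prop :=
  GoodG nn d ∧ GoodG nn p ∧ RelG nn d p

-- "safe after k rounds", defined from A's out-adjacency d
def Sd (nn : Nat) (d : List (List Int)) : Nat → Nat → Prop
  | 0, _ => False
  | k+1, v => ∀ u, u < nn → 0 < cntc nn v (d.getD u []) → Sd nn d k u
-- the same, from B's predecessor lists p
def Sp (nn : Nat) (p : List (List Int)) : Nat → Nat → Prop
  | 0, _ => False
  | k+1, v => ∀ x ∈ p.getD v [], Sp nn p k (canonI nn x)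

-- indegree of v counting only edges whose source is not yet processed (not in P)
def indegF (nn : Nat) (d : List (List Int)) (P : List Nat) (v : Nat) : Nat :=
  ∑ u ∈ (Finset.range nn).filter (fun u => u ∉ P), cntc nn v (d.getD u [])

structure KInv (nn : Nat) (d : List (List Int)) (P : List Nat) (Q : List Int) (ind : List Int) : Prop where
  len : ind.length = nn
  val : ∀ v, v < nn → ind.getD v 0 = (indegF nn d P v : Int)
  qr : ∀ q ∈ Q, InR nn q
  nod : (P ++ Q.map (canonI nn)).Nodup
  pr : ∀ u ∈ P, u < nn
  zero_mem : ∀ v, v < nn → indegF nn d P v = 0 → v ∈ P ∨ v ∈ Q.map (canonI nn)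
  qzero : ∀ q ∈ Q, indegF nn d P (canonI nn q) = 0
  pzero : ∀ u ∈ P, indegF nn d P u = 0
  sound : ∀ i (h : i < P.length), Sd nn d (i+1) P[i]

-- basic index bridges
theorem canonI_lt (nn : Nat) (i : Int) (h : InR nn i) : canonI nn i < nn := by
  obtain ⟨h1, h2⟩ := h; unfold canonI; split <;> omega
theorem canonI_natCast (nn : Nat) (k : Nat) (_h : k < nn) : canonI nn (k : Int) = k := by
  unfold canonI; split <;> omega
theorem pyIdx?_canon (nn : Nat) (i : Int) (h : InR nn i) :
    PySem.List.pyIdx? nn i = some (canonI nn i) := by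
  obtain ⟨h1, h2⟩ := h; unfold PySem.List.pyIdx? canonI; split_ifs <;> simp <;> omega
theorem pyGetD_canon {α : Type} (xs : List α) (i : Int) (dflt : α) (h : InR xs.length i) :
    PySem.List.pyGetD xs i dflt = xs.getD (canonI xs.length i) dflt := by
  simp [PySem.List.pyGetD, PySem.List.pyGet?, pyIdx?_canon _ _ h, List.getD_eq_getElem?_getD]
theorem pySetD_canon {α : Type} (xs : List α) (i : Int) (v : α) (h : InR xs.length i) :
    PySem.List.pySetD xs i v = xs.set (canonI xs.length i) v := by
  simp [PySem.List.pySetD, PySem.List.pySet?, pyIdx?_canon _ _ h]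

theorem getD_set_self {α : Type} (xs : List α) (k : Nat) (v d : α) (h : k < xs.length) :
    (xs.set k v).getD k d = v := by
  simp [List.getD_eq_getElem?_getD, h]
theorem getD_set_ne {α : Type} (xs : List α) (k j : Nat) (v d : α) (h : j ≠ k) :
    (xs.set k v).getD j d = xs.getD j d := by
  simp [List.getD_eq_getElem?_getD, Ne.symm h]

theorem cntc_nil (nn w : Nat) : cntc nn w [] = 0 := rfl
theorem cntc_cons (nn w : Nat) (x : Int) (l : List Int) :
    cntc nn w (x :: l) = cntc nn w l + (if canonI nn x = w then 1 else 0) := by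
  simp [cntc, List.count_cons]
theorem cntc_append_singleton (nn w : Nat) (l : List Int) (x : Int) :
    cntc nn w (l ++ [x]) = cntc nn w l + (if canonI nn x = w then 1 else 0) := by
  simp [cntc, List.count_append, List.count_singleton]
theorem cntc_pos_iff (nn w : Nat) (lst : List Int) :
    0 < cntc nn w lst ↔ ∃ x ∈ lst, canonI nn x = w := by
  simp [cntc, List.count_pos_iff, List.mem_map, eq_comm]

theorem inc_fold (nn : Nat) (lst : List Int) :
    ∀ ind : List Int, ind.length = nn → (∀ x ∈ lst, InR nn x) →
    (lst.foldl (fun ind v => PySem.List.pySetD ind v (PySem.List.pyGetD ind v 0 + 1)) ind).length = nn ∧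
    ∀ w, w < nn →
      (lst.foldl (fun ind v => PySem.List.pySetD ind v (PySem.List.pyGetD ind v 0 + 1)) ind).getD w 0
        = ind.getD w 0 + (cntc nn w lst : Int) := by
  induction lst with
  | nil => intro ind hlen _; simpa [cntc_nil] using hlen
  | cons x l ih =>
    intro ind hlen hr
    have hx : InR nn x := hr x (by simp)
    have hx' : InR ind.length x := by rw [hlen]; exact hx
    have hset : PySem.List.pySetD ind x (PySem.List.pyGetD ind x 0 + 1)
        = ind.set (canonI nn x) (ind.getD (canonI nn x) 0 + 1) := by
      rw [pySetD_canon _ _ _ hx', pyGetD_canon _ _ _ hx', hlen]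
    have hlen' : (ind.set (canonI nn x) (ind.getD (canonI nn x) 0 + 1)).length = nn := by
      simpa using hlen
    obtain ⟨L, V⟩ := ih (ind.set (canonI nn x) (ind.getD (canonI nn x) 0 + 1)) hlen'
      (fun y hy => hr y (by simp [hy]))
    refine ⟨by simpa [hset] using L, fun w hw => ?_⟩
    have := V w hw
    simp only [List.foldl_cons, hset]
    rw [this]
    by_cases hc : canonI nn x = w
    · subst hc
      rw [getD_set_self _ _ _ _ (by rw [hlen]; exact canonI_lt nn x hx)]
      rw [cntc_cons]; simp; ring
    · rw [getD_set_ne _ _ _ _ _ (Ne.symm hc), cntc_cons]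
      simp [hc]

def kstep (s : List Int × List Int) (adj : Int) : List Int × List Int :=
  let ind' := PySem.List.pySetD s.1 adj (PySem.List.pyGetD s.1 adj 0 - 1)
  if PySem.List.pyGetD ind' adj 0 == 0 then (ind', s.2 ++ [adj]) else (ind', s.2)

theorem kahn_fold (nn : Nat) (lst : List Int) :
    ∀ (ind q : List Int), ind.length = nn → (∀ x ∈ lst, InR nn x) →
    (∀ w, w < nn → (cntc nn w lst : Int) ≤ ind.getD w 0) →
    (∀ w, w < nn → 0 ≤ ind.getD w 0) →
    (lst.foldl kstep (ind, q)).1.length = nn ∧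
    (∀ w, w < nn → (lst.foldl kstep (ind, q)).1.getD w 0 = ind.getD w 0 - (cntc nn w lst : Int)) ∧
    ∃ extra, (lst.foldl kstep (ind, q)).2 = q ++ extra ∧
      (∀ x ∈ extra, x ∈ lst) ∧ (extra.map (canonI nn)).Nodup ∧
      (∀ w, w < nn → ((w ∈ extra.map (canonI nn)) ↔ (0 < cntc nn w lst ∧ ind.getD w 0 = (cntc nn w lst : Int)))) := by
  induction lst with
  | nil =>
    intro ind q hlen _ _ _
    refine ⟨hlen, fun w hw => by simp [cntc_nil], [], by simp, by simp, by simp, fun w hw => by simp [cntc_nil]⟩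
  | cons x l ih =>
    intro ind q hlen hr hge hnn
    have hx : InR nn x := hr x (by simp)
    have hxl : InR ind.length x := by rw [hlen]; exact hx
    have hc : canonI nn x < nn := canonI_lt nn x hx
    obtain ⟨c, hcdef⟩ : ∃ c, canonI nn x = c := ⟨_, rfl⟩
    rw [hcdef] at hc
    have hcl : c < ind.length := by omega
    have hset : PySem.List.pySetD ind x (PySem.List.pyGetD ind x 0 - 1)
        = ind.set c (ind.getD c 0 - 1) := by
      rw [pySetD_canon _ _ _ hxl, pyGetD_canon _ _ _ hxl, hlen, hcdef]
    have hlen1 : (ind.set c (ind.getD c 0 - 1)).length = nn := by simpa using hlen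
    have hget1 : (ind.set c (ind.getD c 0 - 1)).getD c 0 = ind.getD c 0 - 1 :=
      getD_set_self _ _ _ _ hcl
    have hget1' : ∀ w, w ≠ c → (ind.set c (ind.getD c 0 - 1)).getD w 0 = ind.getD w 0 :=
      fun w hw => getD_set_ne _ _ _ _ _ hw
    have hcval : PySem.List.pyGetD (PySem.List.pySetD ind x (PySem.List.pyGetD ind x 0 - 1)) x 0
        = ind.getD c 0 - 1 := by
      rw [hset, pyGetD_canon _ _ _ (by rw [hlen1]; exact hx), hlen1, hcdef, hget1]
    have hcnt1 : 0 < cntc nn c (x :: l) := by rw [cntc_cons, hcdef]; simp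
    have hge1 : (1 : Int) ≤ ind.getD c 0 := le_trans (by exact_mod_cast hcnt1) (hge c hc)
    have hcx : cntc nn c (x :: l) = cntc nn c l + 1 := by rw [cntc_cons, hcdef]; simp
    have hcw : ∀ w, w ≠ c → cntc nn w (x :: l) = cntc nn w l := by
      intro w hw; rw [cntc_cons, hcdef]; simp [Ne.symm hw]
    by_cases hz : ind.getD c 0 - 1 = 0
    · -- the decrement reaches zero: x is appended to the queue
      have happ : kstep (ind, q) x = (ind.set c (ind.getD c 0 - 1), q ++ [x]) := by
        simp only [kstep, hcval]
        rw [if_pos (show ((ind.getD c 0 - 1 : Int) == 0) = true by simpa using hz), hset]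
      have hcle : (cntc nn c (x :: l) : Int) ≤ ind.getD c 0 := hge c hc
      have hcl0 : cntc nn c l = 0 := by omega
      rw [List.foldl_cons, happ]
      obtain ⟨L, V, extra, hq, hmem, hnd, hchar⟩ := ih (ind.set c (ind.getD c 0 - 1)) (q ++ [x]) hlen1
        (fun y hy => hr y (by simp [hy]))
        (fun w hw => by
          by_cases hwc : w = c
          · subst hwc; rw [hget1]; omega
          · rw [hget1' w hwc]; have := hge w hw; rw [hcw w hwc] at this; omega)
        (fun w hw => by
          by_cases hwc : w = c
          · subst hwc; rw [hget1]; omega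
          · rw [hget1' w hwc]; exact hnn w hw)
      refine ⟨L, fun w hw => ?_, x :: extra, by rw [hq]; simp, ?_, ?_, fun w hw => ?_⟩
      · rw [V w hw]
        by_cases hwc : w = c
        · subst hwc; rw [hget1, hcx, hcl0]; ring
        · rw [hget1' w hwc, hcw w hwc]
      · intro y hy
        simp only [List.mem_cons] at hy ⊢
        rcases hy with rfl | hy
        · exact Or.inl rfl
        · exact Or.inr (hmem y hy)
      · simp only [List.map_cons, List.nodup_cons, hcdef]
        refine ⟨fun hmem' => ?_, hnd⟩
        have := (hchar c hc).mp hmem'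
        rw [hcl0] at this; omega
      · by_cases hwc : w = c
        · subst hwc
          have hmemc : w ∈ (x :: extra).map (canonI nn) := by
            simp only [List.map_cons, List.mem_cons]; exact Or.inl hcdef.symm
          constructor
          · intro _
            refine ⟨hcnt1, ?_⟩
            rw [hcx, hcl0]; push_cast; omega
          · intro _; exact hmemc
        · have := hchar w hw
          rw [hget1' w hwc] at this
          rw [hcw w hwc]
          constructor
          · intro h
            simp only [List.map_cons, List.mem_cons, hcdef] at h
            rcases h with h | h
            · exact absurd h hwc
            · exact this.mp h
          · intro h
            simp only [List.map_cons, List.mem_cons]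
            exact Or.inr (this.mpr h)
    · -- the decrement does not reach zero
      have happ : kstep (ind, q) x = (ind.set c (ind.getD c 0 - 1), q) := by
        simp only [kstep, hcval]
        rw [if_neg (show ¬((ind.getD c 0 - 1 : Int) == 0) = true by simpa using hz), hset]
      rw [List.foldl_cons, happ]
      obtain ⟨L, V, extra, hq, hmem, hnd, hchar⟩ := ih (ind.set c (ind.getD c 0 - 1)) q hlen1
        (fun y hy => hr y (by simp [hy]))
        (fun w hw => by
          by_cases hwc : w = c
          · subst hwc; rw [hget1]; have := hge w hc; rw [hcx] at this; push_cast at this ⊢; omega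
          · rw [hget1' w hwc]; have := hge w hw; rw [hcw w hwc] at this; omega)
        (fun w hw => by
          by_cases hwc : w = c
          · subst hwc; rw [hget1]; have := hge w hc; rw [hcx] at this; push_cast at this; omega
          · rw [hget1' w hwc]; exact hnn w hw)
      refine ⟨L, fun w hw => ?_, extra, hq, fun y hy => List.mem_cons_of_mem x (hmem y hy), hnd, fun w hw => ?_⟩
      · rw [V w hw]
        by_cases hwc : w = c
        · subst hwc; rw [hget1, hcx]; push_cast; ring
        · rw [hget1' w hwc, hcw w hwc]
      · have := hchar w hw
        by_cases hwc : w = c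
        · subst hwc
          rw [hget1] at this
          rw [this, hcx]
          constructor
          · rintro ⟨h1, h2⟩
            refine ⟨by omega, by push_cast at h2 ⊢; omega⟩
          · rintro ⟨h1, h2⟩
            have h2' : ind.getD w 0 - 1 = ((cntc nn w l : Nat) : Int) := by push_cast at h2 ⊢; omega
            have hcnt0 : 0 < cntc nn w l := by omega
            exact ⟨hcnt0, h2'⟩
        · rw [hget1' w hwc] at this
          rw [hcw w hwc]
          exact this

theorem Sd_mono (nn : Nat) (d : List (List Int)) :
    ∀ k v, Sd nn d k v → Sd nn d (k+1) v := by
  intro k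
  induction k with
  | zero => intro v h; exact False.elim h
  | succ k ih =>
    intro v h u hu hcnt
    exact ih u (h u hu hcnt)

theorem Sd_mono_le (nn : Nat) (d : List (List Int)) :
    ∀ j k, j ≤ k → ∀ v, Sd nn d j v → Sd nn d k v := by
  intro j k hjk
  induction k with
  | zero => intro v h; have : j = 0 := by omega
            subst this; exact h
  | succ k ih =>
    intro v h
    by_cases hj : j = k + 1
    · subst hj; exact h
    · exact Sd_mono nn d k v (ih (by omega) v h)

theorem indegF_term_le (nn : Nat) (d : List (List Int)) (P : List Nat) (w v : Nat)
    (hv : v < nn) (hvP : v ∉ P) :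
    cntc nn w (d.getD v []) ≤ indegF nn d P w := by
  unfold indegF
  refine Finset.single_le_sum (f := fun u => cntc nn w (d.getD u [])) (fun i _ => Nat.zero_le _) ?_
  simp only [Finset.mem_filter, Finset.mem_range]
  exact ⟨hv, hvP⟩

theorem indegF_append (nn : Nat) (d : List (List Int)) (P : List Nat) (w v : Nat)
    (hv : v < nn) (hvP : v ∉ P) :
    indegF nn d P w = cntc nn w (d.getD v []) + indegF nn d (P ++ [v]) w := by
  unfold indegF
  have hfil : (Finset.range nn).filter (fun u => u ∉ P ++ [v])
      = ((Finset.range nn).filter (fun u => u ∉ P)).erase v := by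
    ext u
    simp only [Finset.mem_erase, Finset.mem_filter, Finset.mem_range, List.mem_append,
      List.mem_singleton]
    tauto
  rw [hfil]
  refine (Finset.add_sum_erase _ _ ?_).symm
  simp only [Finset.mem_filter, Finset.mem_range]
  exact ⟨hv, hvP⟩

theorem length_le_of_nodup_lt (nn : Nat) (P : List Nat) (hnd : P.Nodup)
    (hlt : ∀ u ∈ P, u < nn) : P.length ≤ nn := by
  classical
  have hsub : P.toFinset ⊆ Finset.range nn := by
    intro u hu; simp only [Finset.mem_range]; exact hlt u (List.mem_toFinset.mp hu)
  have := Finset.card_le_card hsub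
  rwa [List.toFinset_card_of_nodup hnd, Finset.card_range] at this

theorem kinv_restrict (nn : Nat) (d : List (List Int)) (P : List Nat) (Q ind : List Int)
    (inv : KInv nn d P Q ind) (hQ : Q = []) : KInv nn d P [] ind := by
  subst hQ; exact inv

theorem kinv_full (nn : Nat) (d : List (List Int)) (P : List Nat) (Q ind : List Int)
    (inv : KInv nn d P Q ind) (hfull : nn ≤ P.length) : Q = [] := by
  have hlen := length_le_of_nodup_lt nn (P ++ Q.map (canonI nn)) inv.nod
    (by
      intro u hu
      rcases List.mem_append.mp hu with hu | hu
      · exact inv.pr u hu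
      · obtain ⟨q, hq, rfl⟩ := List.mem_map.mp hu
        exact canonI_lt nn q (inv.qr q hq))
  simp only [List.length_append, List.length_map] at hlen
  have : Q.length = 0 := by omega
  exact List.eq_nil_of_length_eq_zero this

theorem kahn_run (nn : Nat) (d : List (List Int)) (hdlen : d.length = nn)
    (hg : ∀ l ∈ d, ∀ x ∈ l, InR nn x) :
    ∀ (fuel : Nat) (Q ind : List Int) (P : List Nat), KInv nn d P Q ind →
    nn - P.length ≤ fuel →
    ∃ P', KInv nn d P' [] (kahnA d fuel Q ind) := by
  intro fuel
  induction fuel with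
  | zero =>
    intro Q ind P inv hf
    have hQ : Q = [] := kinv_full nn d P Q ind inv (by omega)
    exact ⟨P, by rw [kahnA]; exact kinv_restrict nn d P Q ind inv hQ⟩
  | succ fuel ih =>
    intro Q ind P inv hf
    match hQm : Q with
    | [] => exact ⟨P, by rw [kahnA]; exact inv⟩
    | node :: rest =>
      have hnode : InR nn node := inv.qr node (by simp)
      obtain ⟨v, hvdef⟩ : ∃ v, canonI nn node = v := ⟨_, rfl⟩
      have hv : v < nn := hvdef ▸ canonI_lt nn node hnode
      have hlst : PySem.List.pyGetD d node [] = d.getD v [] := by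
        rw [pyGetD_canon _ _ _ (by rw [hdlen]; exact hnode), hdlen, hvdef]
      have hlstmem : d.getD v [] ∈ d := by
        rw [List.getD_eq_getElem?_getD, List.getElem?_eq_getElem (by omega)]
        exact List.getElem_mem _
      have hlstR : ∀ x ∈ d.getD v [], InR nn x := hg _ hlstmem
      have hvP : v ∉ P := by
        have hnod := inv.nod
        rw [List.nodup_append] at hnod
        intro hvin
        have : v ∈ (node :: rest).map (canonI nn) := by
          simp only [List.map_cons, List.mem_cons]
          exact Or.inl hvdef.symm
        exact hnod.2.2 v hvin v this rfl
      obtain ⟨L, V, extra, hq, hmem, hnd, hchar⟩ := kahn_fold nn (d.getD v []) ind rest inv.len hlstR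
        (fun w hw => by
          rw [inv.val w hw]
          exact_mod_cast indegF_term_le nn d P w v hv hvP)
        (fun w hw => by rw [inv.val w hw]; exact_mod_cast Nat.zero_le _)
      have hrec : kahnA d (fuel+1) (node :: rest) ind
          = kahnA d fuel ((d.getD v []).foldl kstep (ind, rest)).2 ((d.getD v []).foldl kstep (ind, rest)).1 := by
        rw [kahnA]
        rw [show ((PySem.List.pyGetD d node []).foldl
            (fun (s : List Int × List Int) adj =>
              let ind' := PySem.List.pySetD s.1 adj (PySem.List.pyGetD s.1 adj 0 - 1)
              if PySem.List.pyGetD ind' adj 0 == 0 then (ind', s.2 ++ [adj]) else (ind', s.2))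
            (ind, rest)) = (d.getD v []).foldl kstep (ind, rest) from by rw [hlst]; rfl]
      rw [hrec]
      -- the new invariant
      have hBsub : ∀ w, w < nn → indegF nn d P w = cntc nn w (d.getD v []) + indegF nn d (P ++ [v]) w :=
        fun w hw => indegF_append nn d P w v hv hvP
      have hczero : indegF nn d P v = 0 := by
        have := inv.qzero node (by simp)
        rwa [hvdef] at this
      have inv' : KInv nn d (P ++ [v]) (rest ++ extra) ((d.getD v []).foldl kstep (ind, rest)).1 := by
        refine ⟨L, ?_, ?_, ?_, ?_, ?_, ?_, ?_, ?_⟩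
        · intro w hw
          rw [V w hw, inv.val w hw, hBsub w hw]
          push_cast; ring
        · intro q hqm
          rcases List.mem_append.mp hqm with h | h
          · exact inv.qr q (by simp [h])
          · exact hlstR q (hmem q h)
        · -- nodup
          have hold : (P ++ v :: rest.map (canonI nn)).Nodup := by
            have := inv.nod
            simpa [hvdef] using this
          have hdisj : ∀ w ∈ extra.map (canonI nn), w ∉ P ++ v :: rest.map (canonI nn) := by
            intro w hwm hwin
            have hwlt : w < nn := by
              obtain ⟨q, hq, rfl⟩ := List.mem_map.mp hwm
              exact canonI_lt nn q (hlstR q (hmem q hq))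
            have hpos := (hchar w hwlt).mp hwm
            have hwpos : 0 < indegF nn d P w := by
              have := hpos.2
              rw [inv.val w hwlt] at this
              have h1 := hpos.1
              omega
            rcases List.mem_append.mp hwin with h | h
            · have := inv.pzero w h; omega
            · rcases List.mem_cons.mp h with h | h
              · subst h; omega
              · obtain ⟨q, hq, hqe⟩ := List.mem_map.mp h
                have := inv.qzero q (by simp [hq])
                rw [hqe] at this; omega
          have hbig : ((P ++ v :: rest.map (canonI nn)) ++ extra.map (canonI nn)).Nodup :=
            List.Nodup.append hold hnd (fun a ha hb => hdisj a hb ha)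
          simpa [List.map_append, List.append_assoc] using hbig
        · intro u hu
          rcases List.mem_append.mp hu with h | h
          · exact inv.pr u h
          · rcases List.mem_singleton.mp h with rfl; exact hv
        · -- zero_mem
          intro w hw hzero
          have hsplit := hBsub w hw
          by_cases hcp : 0 < cntc nn w (d.getD v [])
          · have : w ∈ extra.map (canonI nn) := by
              refine (hchar w hw).mpr ⟨hcp, ?_⟩
              rw [inv.val w hw]; push_cast; omega
            right
            rw [List.map_append]
            exact List.mem_append.mpr (Or.inr this)
          · have hz0 : indegF nn d P w = 0 := by omega
            rcases inv.zero_mem w hw hz0 with h | h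
            · exact Or.inl (List.mem_append.mpr (Or.inl h))
            · rcases List.mem_cons.mp (by simpa [hvdef] using h : w ∈ v :: rest.map (canonI nn)) with h | h
              · exact Or.inl (List.mem_append.mpr (Or.inr (by simp [h])))
              · right
                rw [List.map_append]
                exact List.mem_append.mpr (Or.inl h)
        · -- qzero
          intro q hqm
          have hqlt : canonI nn q < nn := by
            rcases List.mem_append.mp hqm with h | h
            · exact canonI_lt nn q (inv.qr q (by simp [h]))
            · exact canonI_lt nn q (hlstR q (hmem q h))
          have hsplit := hBsub (canonI nn q) hqlt
          rcases List.mem_append.mp hqm with h | h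
          · have := inv.qzero q (by simp [h]); omega
          · have : canonI nn q ∈ extra.map (canonI nn) := List.mem_map_of_mem h
            have := (hchar _ hqlt).mp this
            have h2 := this.2
            rw [inv.val _ hqlt] at h2
            omega
        · -- pzero
          intro u hu
          rcases List.mem_append.mp hu with h | h
          · have := inv.pzero u h
            have hsplit := hBsub u (inv.pr u h)
            omega
          · rcases List.mem_singleton.mp h with rfl
            have hsplit := hBsub _ hv
            omega
        · -- sound
          intro i hi
          rw [List.length_append, List.length_singleton] at hi
          by_cases hip : i < P.length
          · have : (P ++ [v])[i] = P[i] := List.getElem_append_left hip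
            rw [this]
            exact inv.sound i hip
          · have hieq : i = P.length := by omega
            subst hieq
            have : (P ++ [v])[P.length] = v := by simp
            rw [this]
            intro u hu hcnt
            have huP : u ∈ P := by
              by_contra huP
              have := indegF_term_le nn d P v u hu huP
              omega
            obtain ⟨j, hj, hje⟩ := List.getElem_of_mem huP
            have := inv.sound j hj
            rw [hje] at this
            exact Sd_mono_le nn d (j+1) P.length (by omega) u this
      rw [hq]
      exact ih (rest ++ extra) _ (P ++ [v]) inv' (by simp; omega)

theorem sum_zero_of_nonneg (l : List Int) (h : ∀ x ∈ l, 0 ≤ x) (hs : l.sum = 0) :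
    ∀ x ∈ l, x = 0 := by
  induction l with
  | nil => simp
  | cons a l ih =>
    have ha := h a (by simp)
    have hl : ∀ x ∈ l, 0 ≤ x := fun x hx => h x (by simp [hx])
    have hsum : 0 ≤ l.sum := List.sum_nonneg hl
    simp only [List.sum_cons] at hs
    have ha0 : a = 0 := by omega
    intro x hx
    rcases List.mem_cons.mp hx with rfl | hx
    · exact ha0
    · exact ih hl (by omega) x hx

theorem kahn_final (nn : Nat) (d : List (List Int)) (P : List Nat) (ind : List Int)
    (inv : KInv nn d P [] ind) :
    (ind.sum = 0) ↔ (∀ v, v < nn → Sd nn d nn v) := by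
  have hget : ∀ v (hv : v < nn), ind.getD v 0 = ind[v]'(by rw [inv.len]; exact hv) := by
    intro v hv
    rw [List.getD_eq_getElem?_getD, List.getElem?_eq_getElem (by rw [inv.len]; omega)]
    rfl
  have hnnv : ∀ x ∈ ind, 0 ≤ x := by
    intro x hx
    obtain ⟨i, hi, rfl⟩ := List.getElem_of_mem hx
    have hilt : i < nn := by rw [← inv.len]; exact hi
    have := inv.val i hilt
    rw [hget i hilt] at this
    rw [this]
    exact_mod_cast Nat.zero_le _
  constructor
  · intro hs v hv
    have hz : ∀ w, w < nn → indegF nn d P w = 0 := by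
      intro w hw
      have := sum_zero_of_nonneg ind hnnv hs (ind[w]'(by rw [inv.len]; omega)) (List.getElem_mem _)
      have hval := inv.val w hw
      rw [hget w hw] at hval
      omega
    have hmemP : ∀ w, w < nn → w ∈ P := by
      intro w hw
      rcases inv.zero_mem w hw (hz w hw) with h | h
      · exact h
      · simp at h
    obtain ⟨j, hj, hje⟩ := List.getElem_of_mem (hmemP v hv)
    have hPnd : P.Nodup := by simpa using inv.nod
    have hPle : P.length ≤ nn := length_le_of_nodup_lt nn P hPnd inv.pr
    have := inv.sound j hj
    rw [hje] at this
    exact Sd_mono_le nn d (j+1) nn (by omega) v this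
  · intro hsafe
    have hmemP : ∀ k, ∀ v, v < nn → Sd nn d k v → v ∈ P := by
      intro k
      induction k with
      | zero => intro v _ h; exact False.elim h
      | succ k ih =>
        intro v hv h
        have hz : indegF nn d P v = 0 := by
          unfold indegF
          refine Finset.sum_eq_zero ?_
          intro u hu
          simp only [Finset.mem_filter, Finset.mem_range] at hu
          by_contra hc
          have hcnt : 0 < cntc nn v (d.getD u []) := by omega
          exact hu.2 (ih u hu.1 (h u hu.1 hcnt))
        rcases inv.zero_mem v hv hz with hm | hm
        · exact hm
        · simp at hm
    have hz : ∀ w, w < nn → indegF nn d P w = 0 := by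
      intro w hw
      exact inv.pzero w (hmemP nn w hw (hsafe w hw))
    have : ∀ x ∈ ind, x = 0 := by
      intro x hx
      obtain ⟨i, hi, rfl⟩ := List.getElem_of_mem hx
      have hilt : i < nn := by rw [← inv.len]; exact hi
      have := inv.val i hilt
      rw [hget i hilt] at this
      rw [this, hz i hilt]
      rfl
    exact List.sum_eq_zero this

-- ===== bridge between Sd and Sp =====
theorem S_bridge (nn : Nat) (d p : List (List Int)) (hp : GoodG nn p) (hrel : RelG nn d p) :
    ∀ k v, v < nn → (Sd nn d k v ↔ Sp nn p k v) := by
  intro k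
  induction k with
  | zero => intro v _; exact Iff.rfl
  | succ k ih =>
    intro v hv
    have hpv : ∀ x ∈ p.getD v [], InR nn x := by
      intro x hx
      have hmem : p.getD v [] ∈ p := by
        rw [List.getD_eq_getElem?_getD, List.getElem?_eq_getElem (by rw [hp.1]; exact hv)]
        exact List.getElem_mem _
      exact hp.2 _ hmem x hx
    constructor
    · intro h x hx
      have hxr := hpv x hx
      have hcx : canonI nn x < nn := canonI_lt nn x hxr
      have hcnt : 0 < cntc nn (canonI nn x) (p.getD v []) := by
        rw [cntc_pos_iff]; exact ⟨x, hx, rfl⟩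
      have hcnt' : 0 < cntc nn v (d.getD (canonI nn x) []) := by
        rw [hrel (canonI nn x) v hcx hv]; exact hcnt
      exact (ih (canonI nn x) hcx).mp (h (canonI nn x) hcx hcnt')
    · intro h u hu hcnt
      have hcnt' : 0 < cntc nn u (p.getD v []) := by rw [← hrel u v hu hv]; exact hcnt
      obtain ⟨x, hx, hxe⟩ := (cntc_pos_iff nn u (p.getD v [])).mp hcnt'
      have := h x hx
      rw [hxe] at this
      exact (ih u hu).mpr this

-- ===== construction lemmas =====
theorem appendAt_length (g : List (List Int)) (i x : Int) :
    (pvAppendAt g i x).length = g.length := by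
  simp [pvAppendAt, PySem.List.length_pySetD]

theorem appendAt_getD (g : List (List Int)) (i x : Int) (h : InR g.length i) (u : Nat) :
    (pvAppendAt g i x).getD u []
      = if u = canonI g.length i then g.getD u [] ++ [x] else g.getD u [] := by
  unfold pvAppendAt
  rw [pySetD_canon _ _ _ h, pyGetD_canon _ _ _ h]
  by_cases hu : u = canonI g.length i
  · subst hu
    rw [if_pos rfl, getD_set_self _ _ _ _ (by
      have := canonI_lt g.length i h
      omega)]
  · rw [if_neg hu, getD_set_ne _ _ _ _ _ hu]

theorem appendAt_good (nn : Nat) (g : List (List Int)) (i x : Int)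
    (hg : GoodG nn g) (hx : InR nn x) : GoodG nn (pvAppendAt g i x) := by
  refine ⟨by rw [appendAt_length]; exact hg.1, ?_⟩
  intro l hl y hy
  unfold pvAppendAt at hl
  have hl' : l ∈ g ∨ l = PySem.List.pyGetD g i [] ++ [x] := by
    rcases hidx : PySem.List.pyIdx? g.length i with _ | k
    · rw [PySem.List.pySetD, PySem.List.pySet?, hidx] at hl
      exact Or.inl (by simpa using hl)
    · rw [PySem.List.pySetD, PySem.List.pySet?, hidx] at hl
      simp only [Option.map_some, Option.getD_some] at hl
      rcases List.mem_or_eq_of_mem_set hl with h | h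
      · exact Or.inl h
      · exact Or.inr h
  rcases hl' with h | h
  · exact hg.2 l h y hy
  · subst h
    rcases List.mem_append.mp hy with h | h
    · have : PySem.List.pyGetD g i [] ∈ g ∨ PySem.List.pyGetD g i [] = [] := by
        rw [PySem.List.pyGetD]
        rcases hget : PySem.List.pyGet? g i with _ | l'
        · exact Or.inr rfl
        · exact Or.inl (by simpa using PySem.List.mem_of_pyGet?_eq_some (xs := g) (i := i) hget)
      rcases this with h2 | h2
      · exact hg.2 _ h2 y h
      · rw [h2] at h; simp at h
    · rw [List.mem_singleton.mp h]; exact hx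

theorem appendAt_rel (nn : Nat) (d p : List (List Int)) (a b : Int)
    (ha : InR nn a) (hb : InR nn b) (h : RelFull nn d p) :
    RelFull nn (pvAppendAt d a b) (pvAppendAt p b a) := by
  obtain ⟨hd, hp, hrel⟩ := h
  have had : InR d.length a := by rw [hd.1]; exact ha
  have hbp : InR p.length b := by rw [hp.1]; exact hb
  refine ⟨appendAt_good nn d a b hd hb, appendAt_good nn p b a hp ha, ?_⟩
  intro u v hu hv
  rw [appendAt_getD d a b had u, appendAt_getD p b a hbp v, hd.1, hp.1]
  by_cases hua : u = canonI nn a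
  · by_cases hvb : v = canonI nn b
    · rw [if_pos hua, if_pos hvb, cntc_append_singleton, cntc_append_singleton,
        hrel u v hu hv, hvb, hua]
      simp
    · rw [if_pos hua, if_neg hvb, cntc_append_singleton, hrel u v hu hv]
      rw [if_neg (fun hh => hvb hh.symm)]
      simp
  · by_cases hvb : v = canonI nn b
    · rw [if_neg hua, if_pos hvb, cntc_append_singleton, hrel u v hu hv]
      rw [if_neg (fun hh => hua hh.symm)]
      simp
    · rw [if_neg hua, if_neg hvb, hrel u v hu hv]

theorem pair_of_len2 (p : List Int) (h : p.length = 2) : ∃ a b, p = [a, b] := by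
  match p, h with
  | [a, b], _ => exact ⟨a, b, rfl⟩

theorem path_fold_good (nn : Nat) :
    ∀ (ps : List (List Int)) (g : List (List Int)), GoodG nn g →
    (∀ p ∈ ps, p.length = 2 ∧ ∀ x ∈ p, InR nn x) →
    GoodG nn (ps.foldl pvAddPathEdges g) := by
  intro ps
  induction ps with
  | nil => intro g hg _; exact hg
  | cons q qs ih =>
    intro g hg hps
    obtain ⟨hlen2, hR⟩ := hps q (by simp)
    obtain ⟨a, b, rfl⟩ := pair_of_len2 q hlen2
    have ha : InR nn a := hR a (by simp)
    have hb : InR nn b := hR b (by simp)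
    rw [List.foldl_cons]
    have : pvAddPathEdges g [a, b] = pvAppendAt (pvAppendAt g a b) b a := rfl
    rw [this]
    exact ih _ (appendAt_good nn _ b a (appendAt_good nn g a b hg hb) ha)
      (fun p hp => hps p (by simp [hp]))

-- ===== parallel BFS =====
def bstepA (node : Int) (s : List Int × PySem.Set Int × List (List Int)) (child : Int) :
    List Int × PySem.Set Int × List (List Int) :=
  if s.2.1.contains child then s
  else (s.1 ++ [child], PySem.Set.add s.2.1 child, pvAppendAt s.2.2 child node)
def bstepB (node : Int) (s : List Int × PySem.Set Int × List (List Int)) (child : Int) :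
    List Int × PySem.Set Int × List (List Int) :=
  if s.2.1.contains child then s
  else (s.1 ++ [child], PySem.Set.add s.2.1 child, pvAppendAt s.2.2 node child)

theorem bfs_fold_rel (nn : Nat) (node : Int) (hnode : InR nn node) :
    ∀ (lst : List Int) (q : List Int) (vis : PySem.Set Int) (d p : List (List Int)),
    (∀ x ∈ lst, InR nn x) → RelFull nn d p →
    (lst.foldl (bstepA node) (q, vis, d)).1 = (lst.foldl (bstepB node) (q, vis, p)).1 ∧
    (lst.foldl (bstepA node) (q, vis, d)).2.1 = (lst.foldl (bstepB node) (q, vis, p)).2.1 ∧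
    RelFull nn (lst.foldl (bstepA node) (q, vis, d)).2.2 (lst.foldl (bstepB node) (q, vis, p)).2.2 ∧
    (∀ x ∈ (lst.foldl (bstepA node) (q, vis, d)).1, x ∈ q ∨ x ∈ lst) := by
  intro lst
  induction lst with
  | nil =>
    intro q vis d p _ hrel
    exact ⟨rfl, rfl, hrel, fun x hx => Or.inl hx⟩
  | cons c cs ih =>
    intro q vis d p hr hrel
    have hc : InR nn c := hr c (by simp)
    rw [List.foldl_cons, List.foldl_cons]
    by_cases hv : vis.contains c
    · rw [show bstepA node (q, vis, d) c = (q, vis, d) from by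
          simp only [bstepA]; rw [if_pos hv],
        show bstepB node (q, vis, p) c = (q, vis, p) from by
          simp only [bstepB]; rw [if_pos hv]]
      obtain ⟨h1, h2, h3, h4⟩ := ih q vis d p (fun x hx => hr x (by simp [hx])) hrel
      exact ⟨h1, h2, h3, fun x hx => by
        rcases h4 x hx with h | h
        · exact Or.inl h
        · exact Or.inr (by simp [h])⟩
    · rw [show bstepA node (q, vis, d) c
          = (q ++ [c], PySem.Set.add vis c, pvAppendAt d c node) from by
          simp only [bstepA]; rw [if_neg hv],
        show bstepB node (q, vis, p) c
          = (q ++ [c], PySem.Set.add vis c, pvAppendAt p node c) from by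
          simp only [bstepB]; rw [if_neg hv]]
      obtain ⟨h1, h2, h3, h4⟩ := ih (q ++ [c]) (PySem.Set.add vis c)
        (pvAppendAt d c node) (pvAppendAt p node c) (fun x hx => hr x (by simp [hx]))
        (appendAt_rel nn d p c node hc hnode hrel)
      refine ⟨h1, h2, h3, fun x hx => ?_⟩
      rcases h4 x hx with h | h
      · rcases List.mem_append.mp h with h | h
        · exact Or.inl h
        · exact Or.inr (by simp [List.mem_singleton.mp h])
      · exact Or.inr (by simp [h])

theorem bfs_rel (nn : Nat) (ud : List (List Int)) (hud : GoodG nn ud) :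
    ∀ (fuel : Nat) (queue : List Int) (vis : PySem.Set Int) (d p : List (List Int)),
    (∀ x ∈ queue, InR nn x) → RelFull nn d p →
    RelFull nn (bfsA ud fuel queue vis d) (bfsB ud fuel queue vis p) := by
  intro fuel
  induction fuel with
  | zero => intro queue vis d p _ hrel; rw [bfsA, bfsB]; exact hrel
  | succ fuel ih =>
    intro queue vis d p hq hrel
    match queue with
    | [] => rw [bfsA, bfsB]; exact hrel
    | node :: rest =>
      have hnode : InR nn node := hq node (by simp)
      have hlst : PySem.List.pyGetD ud node [] = ud.getD (canonI nn node) [] := by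
        rw [pyGetD_canon _ _ _ (by rw [hud.1]; exact hnode), hud.1]
      have hlstR : ∀ x ∈ PySem.List.pyGetD ud node [], InR nn x := by
        rw [hlst]
        intro x hx
        have hmem : ud.getD (canonI nn node) [] ∈ ud := by
          rw [List.getD_eq_getElem?_getD,
            List.getElem?_eq_getElem (by rw [hud.1]; exact canonI_lt nn node hnode)]
          exact List.getElem_mem _
        exact hud.2 _ hmem x hx
      obtain ⟨h1, h2, h3, h4⟩ := bfs_fold_rel nn node hnode (PySem.List.pyGetD ud node [])
        rest vis d p hlstR hrel
      have hstepA : bfsA ud (fuel+1) (node :: rest) vis d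
          = bfsA ud fuel ((PySem.List.pyGetD ud node []).foldl (bstepA node) (rest, vis, d)).1
              ((PySem.List.pyGetD ud node []).foldl (bstepA node) (rest, vis, d)).2.1
              ((PySem.List.pyGetD ud node []).foldl (bstepA node) (rest, vis, d)).2.2 := by
        rw [bfsA]
        rfl
      have hstepB : bfsB ud (fuel+1) (node :: rest) vis p
          = bfsB ud fuel ((PySem.List.pyGetD ud node []).foldl (bstepB node) (rest, vis, p)).1
              ((PySem.List.pyGetD ud node []).foldl (bstepB node) (rest, vis, p)).2.1
              ((PySem.List.pyGetD ud node []).foldl (bstepB node) (rest, vis, p)).2.2 := by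
        rw [bfsB]
        rfl
      rw [hstepA, hstepB, ← h1, ← h2]
      refine ih _ _ _ _ (fun x hx => ?_) h3
      rcases h4 x hx with h | h
      · exact hq x (by simp [h])
      · exact hlstR x h

theorem order_fold_rel (nn : Nat) :
    ∀ (os : List (List Int)) (d p : List (List Int)),
    RelFull nn d p → (∀ o ∈ os, o.length = 2 ∧ ∀ x ∈ o, InR nn x) →
    RelFull nn
      (os.foldl (fun g p => match p with | [a, b] => pvAppendAt g b a | _ => g) d)
      (os.foldl (fun g p => match p with | [a, b] => pvAppendAt g a b | _ => g) p) := by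
  intro os
  induction os with
  | nil => intro d p h _; exact h
  | cons o os ih =>
    intro d p h hos
    obtain ⟨hlen2, hR⟩ := hos o (by simp)
    obtain ⟨a, b, rfl⟩ := pair_of_len2 o hlen2
    rw [List.foldl_cons, List.foldl_cons]
    exact ih (pvAppendAt d b a) (pvAppendAt p a b)
      (appendAt_rel nn d p b a (hR b (by simp)) (hR a (by simp)) h)
      (fun o ho => hos o (by simp [ho]))

theorem sum_range_list (n : Nat) (f : Nat → Nat) :
    ∑ i ∈ Finset.range n, f i = ((List.range n).map f).sum := by
  induction n with
  | zero => simp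
  | succ n ih => rw [Finset.sum_range_succ, List.range_succ]; simp [ih]

theorem indegF_nil (nn : Nat) (d : List (List Int)) (hlen : d.length = nn) (w : Nat) :
    indegF nn d [] w = (d.map (cntc nn w)).sum := by
  unfold indegF
  have h1 : (Finset.range nn).filter (fun u => u ∉ ([] : List Nat)) = Finset.range nn := by simp
  rw [h1, ← hlen]
  have hdl : (List.range d.length).map (fun u => d.getD u []) = d := by
    apply List.ext_getElem (by simp)
    intro i h1 h2
    simp [List.getD_eq_getElem?_getD, List.getElem?_eq_getElem h2]
  calc ∑ u ∈ Finset.range d.length, cntc d.length w (d.getD u [])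
      = ((List.range d.length).map (fun u => cntc d.length w (d.getD u []))).sum :=
        sum_range_list d.length _
    _ = (((List.range d.length).map (fun u => d.getD u [])).map (cntc d.length w)).sum := by
        rw [List.map_map]; rfl
    _ = (d.map (cntc d.length w)).sum := by rw [hdl]

theorem inc_fold2 (nn : Nat) (gs : List (List Int)) :
    ∀ ind : List Int, ind.length = nn → (∀ l ∈ gs, ∀ x ∈ l, InR nn x) →
    (gs.foldl (fun ind adj => adj.foldl
        (fun ind v => PySem.List.pySetD ind v (PySem.List.pyGetD ind v 0 + 1)) ind) ind).length = nn ∧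
    ∀ w, w < nn →
      (gs.foldl (fun ind adj => adj.foldl
          (fun ind v => PySem.List.pySetD ind v (PySem.List.pyGetD ind v 0 + 1)) ind) ind).getD w 0
        = ind.getD w 0 + ((gs.map (cntc nn w)).sum : Int) := by
  induction gs with
  | nil => intro ind hlen _; exact ⟨hlen, fun w hw => by simp⟩
  | cons g gs ih =>
    intro ind hlen hr
    obtain ⟨L1, V1⟩ := inc_fold nn g ind hlen (hr g (by simp))
    obtain ⟨L2, V2⟩ := ih _ L1 (fun l hl => hr l (by simp [hl]))
    rw [List.foldl_cons]
    refine ⟨L2, fun w hw => ?_⟩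
    rw [V2 w hw, V1 w hw]
    simp only [List.map_cons, List.sum_cons]
    push_cast; ring

theorem getD_replicate_zero (nn w : Nat) : (List.replicate nn (0 : Int)).getD w 0 = 0 := by
  rcases Nat.lt_or_ge w nn with h | h
  · rw [List.getD_eq_getElem?_getD, List.getElem?_eq_getElem (by simpa using h)]
    simp
  · rw [List.getD_eq_getElem?_getD, List.getElem?_eq_none (by simpa using h)]
    rfl

theorem getD_map_const_b {α β : Type} (l : List α) (c : β) (v : Nat) :
    (l.map (fun _ => c)).getD v c = c := by
  rw [List.getD_eq_getElem?_getD, List.getElem?_map]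
  cases l[v]? <;> rfl

theorem pyRange_zero_toNat (n : Int) (h : 0 ≤ n) :
    PySem.List.pyRange 0 n 1 = (List.range n.toNat).map (fun k : Nat => (k : Int)) := by
  have hn : n = ((n.toNat : Nat) : Int) := (Int.toNat_of_nonneg h).symm
  conv_lhs => rw [hn]
  exact PySem.List.pyRange_zero_natCast n.toNat

theorem foldl_const_iterate {α β : Type} (f : α → α) :
    ∀ (l : List β) (init : α), l.foldl (fun s _ => f s) init = f^[l.length] init := by
  intro l
  induction l with
  | nil => intro init; rfl
  | cons x xs ih =>
    intro init
    rw [List.foldl_cons, ih, List.length_cons, Function.iterate_succ_apply]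

def roundB (n : Int) (pred : List (List Int)) (safe : List Bool) : List Bool :=
  (PySem.List.pyRange 0 n 1).map
    (fun v => (PySem.List.pyGetD pred v []).all (fun u => PySem.List.pyGetD safe u false))

theorem round_step (n : Int) (nn : Nat) (hn0 : 0 ≤ n) (hnn : n.toNat = nn)
    (p : List (List Int)) (hp : GoodG nn p) (k : Nat) (s : List Bool)
    (hs : s.length = nn) (hiff : ∀ v, v < nn → (s.getD v false = true ↔ Sp nn p k v)) :
    (roundB n p s).length = nn ∧
    ∀ v, v < nn → ((roundB n p s).getD v false = true ↔ Sp nn p (k+1) v) := by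
  have hrange : PySem.List.pyRange 0 n 1 = (List.range nn).map (fun k : Nat => (k : Int)) := by
    rw [pyRange_zero_toNat n hn0, hnn]
  constructor
  · unfold roundB; rw [hrange]; simp
  · intro v hv
    have hvget : (roundB n p s).getD v false
        = (PySem.List.pyGetD p (v : Int) []).all (fun u => PySem.List.pyGetD s u false) := by
      unfold roundB
      rw [hrange, List.map_map, List.getD_eq_getElem?_getD,
        List.getElem?_eq_getElem (by simpa using hv)]
      simp [List.getElem_map, List.getElem_range]
    rw [hvget]
    have hpv : PySem.List.pyGetD p (v : Int) [] = p.getD v [] := PySem.List.pyGetD_natCast p v []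
    rw [hpv]
    have hpmem : ∀ x ∈ p.getD v [], InR nn x := by
      intro x hx
      have hmem : p.getD v [] ∈ p := by
        rw [List.getD_eq_getElem?_getD, List.getElem?_eq_getElem (by rw [hp.1]; exact hv)]
        exact List.getElem_mem _
      exact hp.2 _ hmem x hx
    rw [List.all_eq_true]
    constructor
    · intro h x hx
      have hxr := hpmem x hx
      have := h x hx
      rw [pyGetD_canon s x false (by rw [hs]; exact hxr), hs] at this
      exact (hiff (canonI nn x) (canonI_lt nn x hxr)).mp this
    · intro h x hx
      have hxr := hpmem x hx
      rw [pyGetD_canon s x false (by rw [hs]; exact hxr), hs]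
      exact (hiff (canonI nn x) (canonI_lt nn x hxr)).mpr (h x hx)

theorem rounds_all (n : Int) (nn : Nat) (hn0 : 0 ≤ n) (hnn : n.toNat = nn)
    (p : List (List Int)) (hp : GoodG nn p) :
    (((PySem.List.pyRange 0 n 1).foldl
        (fun safe _ => (PySem.List.pyRange 0 n 1).map
          (fun v => (PySem.List.pyGetD p v []).all (fun u => PySem.List.pyGetD safe u false)))
        ((PySem.List.pyRange 0 n 1).map (fun _ => false))).all (fun b => b) = true)
      ↔ (∀ v, v < nn → Sp nn p nn v) := by
  have hrange : PySem.List.pyRange 0 n 1 = (List.range nn).map (fun k : Nat => (k : Int)) := by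
    rw [pyRange_zero_toNat n hn0, hnn]
  have hlenr : (PySem.List.pyRange 0 n 1).length = nn := by rw [hrange]; simp
  have hfold : (PySem.List.pyRange 0 n 1).foldl
      (fun safe _ => (PySem.List.pyRange 0 n 1).map
        (fun v => (PySem.List.pyGetD p v []).all (fun u => PySem.List.pyGetD safe u false)))
      ((PySem.List.pyRange 0 n 1).map (fun _ => false))
      = (roundB n p)^[nn] ((PySem.List.pyRange 0 n 1).map (fun _ => false)) := by
    rw [← hlenr]
    exact foldl_const_iterate (roundB n p) _ _
  have hinv : ∀ j, ((roundB n p)^[j] ((PySem.List.pyRange 0 n 1).map (fun _ => false))).length = nn ∧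
      ∀ v, v < nn → (((roundB n p)^[j] ((PySem.List.pyRange 0 n 1).map (fun _ => false))).getD v false = true
        ↔ Sp nn p j v) := by
    intro j
    induction j with
    | zero =>
      refine ⟨by rw [Function.iterate_zero_apply, hrange]; simp, fun v hv => ?_⟩
      rw [Function.iterate_zero_apply, getD_map_const_b]
      simp [Sp]
    | succ j ihj =>
      obtain ⟨L, V⟩ := ihj
      rw [Function.iterate_succ_apply']
      exact round_step n nn hn0 hnn p hp j _ L V
  obtain ⟨L, V⟩ := hinv nn
  rw [hfold, List.all_eq_true]
  constructor
  · intro h v hv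
    refine (V v hv).mp ?_
    have hmem : ((roundB n p)^[nn] ((PySem.List.pyRange 0 n 1).map (fun _ => false))).getD v false
        ∈ (roundB n p)^[nn] ((PySem.List.pyRange 0 n 1).map (fun _ => false)) := by
      rw [List.getD_eq_getElem?_getD, List.getElem?_eq_getElem (by rw [L]; exact hv)]
      exact List.getElem_mem _
    exact h _ hmem
  · intro h b hb
    obtain ⟨i, hi, rfl⟩ := List.getElem_of_mem hb
    have hilt : i < nn := by rw [← L]; exact hi
    have := (V i hilt).mpr (h i hilt)
    rw [List.getD_eq_getElem?_getD, List.getElem?_eq_getElem hi] at this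
    exact this

theorem hasCycle_char (nn : Nat) (d : List (List Int)) (hdlen : d.length = nn)
    (hg : ∀ l ∈ d, ∀ x ∈ l, InR nn x) :
    (hasCycleA d = false) ↔ (∀ v, v < nn → Sd nn d nn v) := by
  obtain ⟨L0, V0⟩ := inc_fold2 nn d (List.replicate nn (0 : Int)) (by simp) hg
  subst hdlen
  obtain ⟨ind, hind⟩ : ∃ ind, d.foldl (fun ind adj => adj.foldl
      (fun ind v => PySem.List.pySetD ind v (PySem.List.pyGetD ind v 0 + 1)) ind)
      (List.replicate d.length (0 : Int)) = ind := ⟨_, rfl⟩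
  rw [hind] at L0 V0
  have hval : ∀ w, w < d.length → ind.getD w 0 = (indegF d.length d [] w : Int) := by
    intro w hw
    rw [V0 w hw, getD_replicate_zero, indegF_nil d.length d rfl w]
    simp
  obtain ⟨q0, hq0⟩ : ∃ q0, (PySem.List.pyRange 0 (d.length : Int) 1).filter
      (fun v => PySem.List.pyGetD ind v 0 == 0) = q0 := ⟨_, rfl⟩
  have hrange : PySem.List.pyRange 0 (d.length : Int) 1
      = (List.range d.length).map (fun k : Nat => (k : Int)) := by
    rw [pyRange_zero_toNat _ (by positivity)]
    simp
  have hq0mem : ∀ x, x ∈ q0 ↔ (∃ k : Nat, k < d.length ∧ x = (k : Int) ∧ ind.getD k 0 = 0) := by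
    intro x
    rw [← hq0, List.mem_filter, hrange]
    constructor
    · rintro ⟨hx1, hx2⟩
      obtain ⟨k, hk, rfl⟩ := by simpa using hx1
      refine ⟨k, hk, rfl, ?_⟩
      rw [PySem.List.pyGetD_natCast] at hx2
      exact beq_iff_eq.mp hx2
    · rintro ⟨k, hk, rfl, hz⟩
      refine ⟨by simp [hk], ?_⟩
      rw [PySem.List.pyGetD_natCast]
      exact beq_iff_eq.mpr hz
  have hinv : KInv d.length d [] q0 ind := by
    refine ⟨L0, hval, ?_, ?_, by simp, ?_, ?_, by simp, ?_⟩
    · intro q hq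
      obtain ⟨k, hk, rfl, _⟩ := (hq0mem q).mp hq
      exact ⟨by omega, by exact_mod_cast hk⟩
    · -- nodup
      simp only [List.nil_append]
      have hq0nd : q0.Nodup := by
        rw [← hq0]
        refine List.Nodup.filter _ ?_
        rw [hrange]
        exact (List.nodup_range).map (fun a b => by exact_mod_cast id)
      refine List.Nodup.map_on ?_ hq0nd
      intro x hx y hy he
      obtain ⟨k, hk, rfl, _⟩ := (hq0mem x).mp hx
      obtain ⟨j, hj, rfl, _⟩ := (hq0mem y).mp hy
      rw [canonI_natCast _ _ hk, canonI_natCast _ _ hj] at he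
      exact_mod_cast he
    · -- zero_mem
      intro v hv hz
      right
      refine List.mem_map.mpr ⟨(v : Int), ?_, canonI_natCast _ _ hv⟩
      refine (hq0mem _).mpr ⟨v, hv, rfl, ?_⟩
      rw [hval v hv, hz]; rfl
    · -- qzero
      intro q hq
      obtain ⟨k, hk, rfl, hz⟩ := (hq0mem q).mp hq
      rw [canonI_natCast _ _ hk]
      have := hval k hk
      rw [hz] at this
      exact_mod_cast this.symm
    · -- sound (P = [])
      intro i hi
      exact absurd hi (by simp)
  obtain ⟨P', hP'⟩ := kahn_run d.length d rfl hg (d.length + 1) q0 ind [] hinv (by omega)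
  have hfinal := kahn_final d.length d P' _ hP'
  have hunfold : hasCycleA d = !((kahnA d (d.length + 1) q0 ind).sum == 0) := by
    simp only [hasCycleA]
    rw [hind, hq0]
  rw [hunfold]
  simp only [Bool.not_eq_false', beq_iff_eq]
  exact hfinal

-- ===== VERDICT (by name: the statement is the Claim_ definition above) =====
theorem solution_spec : Claim_equal_solution := by
  unfold Claim_equal_solution
  intro n path order _hdom hpre
  unfold Spec_solution
  obtain ⟨hn, hpath, horder⟩ := hpre
  have hn0 : (0 : Int) ≤ n := by omega
  obtain ⟨nn, hnn⟩ : ∃ nn, n.toNat = nn := ⟨_, rfl⟩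
  have hcast : ((nn : Nat) : Int) = n := by rw [← hnn]; exact Int.toNat_of_nonneg hn0
  have hnn1 : 1 ≤ nn := by omega
  have hInR : ∀ x : Int, -n ≤ x → x < n → InR nn x := by
    intro x h1 h2
    constructor
    · rw [hcast]; omega
    · rw [hcast]; omega
  have hpath' : ∀ p ∈ path, p.length = 2 ∧ ∀ x ∈ p, InR nn x := by
    intro p hp
    refine ⟨(hpath p hp).1, fun x hx => hInR x ?_ ?_⟩
    · exact ((hpath p hp).2 x hx).1
    · exact ((hpath p hp).2 x hx).2
  have horder' : ∀ p ∈ order, p.length = 2 ∧ ∀ x ∈ p, InR nn x := by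
    intro p hp
    refine ⟨(horder p hp).1, fun x hx => hInR x ?_ ?_⟩
    · exact ((horder p hp).2 x hx).1
    · exact ((horder p hp).2 x hx).2
  obtain ⟨base, hbase⟩ : ∃ b, (PySem.List.pyRange 0 n 1).map (fun _ => ([] : List Int)) = b :=
    ⟨_, rfl⟩
  have hblen : base.length = nn := by rw [← hbase, pyRange_zero_toNat n hn0, hnn]; simp
  have hbget : ∀ u : Nat, base.getD u [] = [] := by
    intro u; rw [← hbase]; exact getD_map_const_b _ _ _
  have hbgood : GoodG nn base := by
    refine ⟨hblen, ?_⟩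
    intro l hl x hx
    rw [← hbase] at hl
    obtain ⟨_, _, rfl⟩ := List.mem_map.mp hl
    simp at hx
  have hbrel : RelFull nn base base := by
    refine ⟨hbgood, hbgood, ?_⟩
    intro u v _ _
    rw [hbget u, hbget v, cntc_nil, cntc_nil]
  obtain ⟨ud, hud⟩ : ∃ u, path.foldl pvAddPathEdges base = u := ⟨_, rfl⟩
  have hudgood : GoodG nn ud := by
    rw [← hud]; exact path_fold_good nn path base hbgood hpath'
  obtain ⟨fuel, hfuel⟩ : ∃ f, ud.foldl (fun acc l => acc + l.length) 0 + 1 = f := ⟨_, rfl⟩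
  have h0q : ∀ x ∈ [(0 : Int)], InR nn x := by
    intro x hx
    rw [List.mem_singleton.mp hx]
    constructor
    · simp
    · exact_mod_cast hnn1
  have hrel1 : RelFull nn (bfsA ud fuel [0] (PySem.Set.ofList [0]) base)
      (bfsB ud fuel [0] (PySem.Set.ofList [0]) base) :=
    bfs_rel nn ud hudgood fuel [0] (PySem.Set.ofList [0]) base base h0q hbrel
  obtain ⟨d1, hd1⟩ : ∃ x, bfsA ud fuel [0] (PySem.Set.ofList [0]) base = x := ⟨_, rfl⟩
  obtain ⟨p1, hp1⟩ : ∃ x, bfsB ud fuel [0] (PySem.Set.ofList [0]) base = x := ⟨_, rfl⟩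
  rw [hd1, hp1] at hrel1
  have hrel2 : RelFull nn
      (order.foldl (fun g p => match p with | [a, b] => pvAppendAt g b a | _ => g) d1)
      (order.foldl (fun g p => match p with | [a, b] => pvAppendAt g a b | _ => g) p1) :=
    order_fold_rel nn order d1 p1 hrel1 horder'
  obtain ⟨d2, hd2⟩ : ∃ x,
      order.foldl (fun g p => match p with | [a, b] => pvAppendAt g b a | _ => g) d1 = x := ⟨_, rfl⟩
  obtain ⟨p2, hp2⟩ : ∃ x,
      order.foldl (fun g p => match p with | [a, b] => pvAppendAt g a b | _ => g) p1 = x := ⟨_, rfl⟩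
  rw [hd2, hp2] at hrel2
  obtain ⟨hgd2, hgp2, hrelg⟩ := hrel2
  simp only [solution, solution_alt]
  rw [hbase, hud, hfuel, hd1, hp1, hd2, hp2]
  have hA : ((!hasCycleA d2) = true) ↔ (∀ v, v < nn → Sd nn d2 nn v) := by
    rw [Bool.not_eq_true']
    exact hasCycle_char nn d2 hgd2.1 hgd2.2
  have hB := rounds_all n nn hn0 hnn p2 hgp2
  have hbridge : (∀ v, v < nn → Sd nn d2 nn v) ↔ (∀ v, v < nn → Sp nn p2 nn v) := by
    constructor
    · intro h v hv; exact (S_bridge nn d2 p2 hgp2 hrelg nn v hv).mp (h v hv)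
    · intro h v hv; exact (S_bridge nn d2 p2 hgp2 hrelg nn v hv).mpr (h v hv)
  exact Bool.coe_iff_coe.mp ((hA.trans hbridge).trans hB.symm)
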